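-- pv_equiv track=rewrite | github.com/hexxacubic/ComfyUI-Prompt_Library | Prompt_Extender.py | _parse_double_prompt
-- ===== SOURCE A (Python) =====
-- def _parse_double_prompt(text):
--     """Parse double prompt format into positive and negative parts"""
--     if not text.strip():
--         return "", ""
--
--     lines = text.split('\n')
--
--     # Find separator (---, ----, or -----)
--     separator_idx = -1
--     for i, line in enumerate(lines):
--         if line.strip() in ["---", "----", "-----"]:
--             separator_idx = i
--             break
--
--     if separator_idx != -1:
--         positive = "\n".join(lines[:separator_idx]).strip()
--         negative = "\n".join(lines[separator_idx+1:]).strip()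
--     else:
--         positive = text.strip()
--         negative = ""
--
--     return positive, negative
-- ===== SOURCE B (Python) =====
-- def _parse_double_prompt(text):
--     """Parse double prompt format into positive and negative parts"""
--     if not text.strip():
--         return "", ""
--
--     seen = False
--     before = []
--     after = []
--     for line in text.split('\n'):
--         if seen:
--             after.append(line)
--         elif line.strip() in ("---", "----", "-----"):
--             seen = True
--         else:
--             before.append(line)
--
--     if seen:
--         return "\n".join(before).strip(), "\n".join(after).strip()
--     return text.strip(), ""
-- ===== Notes on version B (the rewrite author's own statement) =====
-- stated objective: alternative
-- what changed: Replaces A's enumerate-to-find-the-separator-index followed by slicing and re-joining with a single forward pass that routes each line into a before/after accumulator around a seen-separator flag; no index, no slices.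
import Mathlib
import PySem

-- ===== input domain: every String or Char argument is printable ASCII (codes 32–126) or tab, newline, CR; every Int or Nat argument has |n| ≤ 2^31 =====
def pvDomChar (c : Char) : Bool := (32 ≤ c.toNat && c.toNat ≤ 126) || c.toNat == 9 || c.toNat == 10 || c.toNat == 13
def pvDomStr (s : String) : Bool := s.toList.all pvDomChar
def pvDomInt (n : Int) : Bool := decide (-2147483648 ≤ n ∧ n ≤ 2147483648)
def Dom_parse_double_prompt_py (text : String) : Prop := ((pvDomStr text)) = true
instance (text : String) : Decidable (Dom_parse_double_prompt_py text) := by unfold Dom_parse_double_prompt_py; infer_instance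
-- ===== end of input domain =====

-- B replaces A's find-separator-index-then-slice-and-rejoin with a single forward pass
-- routing lines into before/after accumulators around a seen-separator flag (objective: alternative).

-- ===== PORT A =====
-- lines are handled as List Char (PySem.Chars is the exact layer under PySem.Str)
def pvSeps : List (List Char) := [['-','-','-'], ['-','-','-','-'], ['-','-','-','-','-']]

-- the 'for i, line in enumerate(lines): … break' search for the separator index
def pvFindSepA : List (List Char) → Int → Int
  | [], _ => -1
  | l :: ls, i =>
    if PySem.Chars.strip l ∈ pvSeps then i
    else pvFindSepA ls (i + 1)

def parse_double_prompt_py (text : String) : String × String :=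
  if PySem.Chars.strip text.toList = [] then ("", "")
  else
    let lines := PySem.Chars.splitOn text.toList ['\n']
    let separator_idx := pvFindSepA lines 0
    if separator_idx ≠ -1 then
      (String.ofList (PySem.Chars.strip (PySem.Chars.join ['\n'] (PySem.List.slice lines none (some separator_idx)))),
       String.ofList (PySem.Chars.strip (PySem.Chars.join ['\n'] (PySem.List.slice lines (some (separator_idx + 1)) none))))
    else
      (String.ofList (PySem.Chars.strip text.toList), "")

-- ===== PORT B =====
-- one-pass state: (seen separator?, before-lines, after-lines)
def pvStepB (st : Bool × List (List Char) × List (List Char)) (line : List Char) :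
    Bool × List (List Char) × List (List Char) :=
  match st with
  | (true, before, after) => (true, before, after ++ [line])
  | (false, before, after) =>
    if PySem.Chars.strip line ∈ pvSeps then (true, before, after)
    else (false, before ++ [line], after)

def parse_double_prompt_py_alt (text : String) : String × String :=
  if PySem.Chars.strip text.toList = [] then ("", "")
  else
    let st := (PySem.Chars.splitOn text.toList ['\n']).foldl pvStepB (false, [], [])
    if st.1 then
      (String.ofList (PySem.Chars.strip (PySem.Chars.join ['\n'] st.2.1)),
       String.ofList (PySem.Chars.strip (PySem.Chars.join ['\n'] st.2.2)))
    else
      (String.ofList (PySem.Chars.strip text.toList), "")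

-- ===== PRECONDITION & SPEC =====
def Spec_parse_double_prompt_py (text : String) (out : String × String) : Prop := out = parse_double_prompt_py_alt text
instance (text : String) (out : String × String) : Decidable (Spec_parse_double_prompt_py text out) := by unfold Spec_parse_double_prompt_py; infer_instance

-- ===== CLAIM (what is proved, stated in full; the proofs are below) =====
def Claim_equal_parse_double_prompt_py : Prop := ∀ (text : String), Dom_parse_double_prompt_py text → Spec_parse_double_prompt_py text (parse_double_prompt_py text)

-- ===== LEMMAS AND PROOFS =====

def pvIsSep (l : List Char) : Bool :=
  decide (PySem.Chars.strip l ∈ pvSeps)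

theorem pvFindSepA_eq (ls : List (List Char)) (i : Int) :
    pvFindSepA ls i =
      match ls.findIdx? pvIsSep with
      | none => -1
      | some j => i + j := by
  induction ls generalizing i with
  | nil => simp [pvFindSepA]
  | cons l ls ih =>
    by_cases h : PySem.Chars.strip l ∈ pvSeps
    · simp [pvFindSepA, h, List.findIdx?_cons, pvIsSep]
    · have hl : pvIsSep l = false := by simp [pvIsSep, h]
      rw [pvFindSepA, if_neg h, ih]
      cases hf : ls.findIdx? pvIsSep with
      | none => simp [List.findIdx?_cons, hl, hf]
      | some j =>
        simp only [List.findIdx?_cons, hl, hf, Option.map_some]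
        push_cast
        ring

theorem pvFoldB_seen (ls : List (List Char)) (b a : List (List Char)) :
    ls.foldl pvStepB (true, b, a) = (true, b, a ++ ls) := by
  induction ls generalizing a with
  | nil => simp
  | cons l ls ih => simp [pvStepB, ih]

theorem pvFoldB_eq (ls : List (List Char)) (b a : List (List Char)) :
    ls.foldl pvStepB (false, b, a) =
      match ls.findIdx? pvIsSep with
      | none => (false, b ++ ls, a)
      | some j => (true, b ++ ls.take j, a ++ ls.drop (j + 1)) := by
  induction ls generalizing b with
  | nil => simp
  | cons l ls ih =>
    by_cases h : PySem.Chars.strip l ∈ pvSeps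
    · simp [pvStepB, h, pvFoldB_seen, List.findIdx?_cons, pvIsSep]
    · have hl : pvIsSep l = false := by simp [pvIsSep, h]
      rw [List.foldl_cons]
      show List.foldl pvStepB (pvStepB (false, b, a) l) ls = _
      rw [show pvStepB (false, b, a) l = (false, b ++ [l], a) by simp [pvStepB, h], ih]
      cases hf : ls.findIdx? pvIsSep with
      | none => simp [List.findIdx?_cons, hl, hf]
      | some j =>
        simp [List.findIdx?_cons, hl, hf, List.take_succ_cons, List.drop_succ_cons]

-- ===== VERDICT (by name: the statement is the Claim_ definition above) =====
theorem parse_double_prompt_py_spec : Claim_equal_parse_double_prompt_py := by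
  intro text _
  unfold Spec_parse_double_prompt_py parse_double_prompt_py parse_double_prompt_py_alt
  by_cases hs : PySem.Chars.strip text.toList = []
  · simp [hs]
  · simp only [if_neg hs]
    set ls := PySem.Chars.splitOn text.toList ['\n'] with hls
    rw [pvFindSepA_eq, pvFoldB_eq]
    cases hf : ls.findIdx? pvIsSep with
    | none => simp
    | some j =>
      have hj : ((j : Int)) ≠ -1 := by omega
      have h1 : PySem.List.slice ls none (some ((j : Int))) = ls.take j := by
        rw [PySem.List.slice_to ls (b := (j : Int)) (by positivity)]
        simp
      have h2 : PySem.List.slice ls (some ((j : Int) + 1)) none = ls.drop (j + 1) := by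
        rw [PySem.List.slice_from ls (a := (j : Int) + 1) (by positivity)]
        congr 1
      simp only [zero_add]
      simp [hj, h1, h2]
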